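-- pv_equiv track=rewrite | github.com/reidg13/pm-os | pm/vault.py | _extract_user_sections
-- ===== SOURCE A (Python) =====
-- _GENERATED_SECTIONS = {
--     "due today & overdue",
--     "active projects",
--     "to investigate",
--     "claude can help with",
--     "industry news",
-- }
--
-- def _extract_user_sections(existing_lines, exclude=None):
--     """Return lines from sections the user added that pm.py doesn't generate.
--     If exclude is given, also skip those section names (lowercase)."""
--     skip = _GENERATED_SECTIONS | (exclude or set())
--     user_content = []
--     in_user_section = False
--     current = []
--
--     for line in existing_lines:
--         if line.startswith("## "):
--             if in_user_section and current:
--                 user_content.extend(current)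
--             heading = line[3:].strip().lower()
--             if heading not in skip:
--                 in_user_section = True
--                 current = ["---", "", line, ""]
--             else:
--                 in_user_section = False
--                 current = []
--         elif in_user_section:
--             current.append(line)
--
--     if in_user_section and current:
--         user_content.extend(current)
--
--     return user_content
-- ===== SOURCE B (Python) =====
-- _GENERATED_SECTIONS = {
--     "due today & overdue",
--     "active projects",
--     "to investigate",
--     "claude can help with",
--     "industry news",
-- }
--
-- def _extract_user_sections(existing_lines, exclude=None):
--     """Group lines into (heading, body) sections, then emit the non-generated ones."""
--     skip = _GENERATED_SECTIONS | (exclude or set())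
--     sections = []
--     for line in existing_lines:
--         if line.startswith("## "):
--             sections.append((line, []))
--         elif sections:
--             sections[-1][1].append(line)
--     out = []
--     for heading_line, body in sections:
--         if heading_line[3:].strip().lower() not in skip:
--             out += ["---", "", heading_line, ""]
--             out += body
--     return out
-- ===== Notes on version B (the rewrite author's own statement) =====
-- stated objective: simpler
-- what changed: Replaces the single flagged state-machine pass (in_user_section/current buffers flushed at each heading) by two plain phases: group lines into (heading, body) sections, then filter-and-emit the kept sections.
import Mathlib
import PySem

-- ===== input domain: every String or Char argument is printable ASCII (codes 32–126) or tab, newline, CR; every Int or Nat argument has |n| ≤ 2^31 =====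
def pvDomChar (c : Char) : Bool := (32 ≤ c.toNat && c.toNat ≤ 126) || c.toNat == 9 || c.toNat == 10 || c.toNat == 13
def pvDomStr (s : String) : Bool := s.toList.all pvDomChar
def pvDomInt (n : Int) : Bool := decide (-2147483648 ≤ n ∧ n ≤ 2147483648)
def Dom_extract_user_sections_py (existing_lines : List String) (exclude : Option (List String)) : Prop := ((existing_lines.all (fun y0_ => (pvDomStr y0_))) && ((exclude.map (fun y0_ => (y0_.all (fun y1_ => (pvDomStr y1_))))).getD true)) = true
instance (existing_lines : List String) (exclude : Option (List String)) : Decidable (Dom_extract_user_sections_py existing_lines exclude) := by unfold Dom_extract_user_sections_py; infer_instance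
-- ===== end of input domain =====

-- B replaces A's flagged single-pass state machine by a two-phase group-then-filter decomposition (same O(n) cost, plainer to read).


-- shared module constant _GENERATED_SECTIONS (a Python set literal)
def pvGenSections : PySem.Set String :=
  PySem.Set.ofList ["due today & overdue", "active projects", "to investigate",
                    "claude can help with", "industry news"]

-- ===== PORT A =====
-- loop body of A's single pass; state = (user_content, in_user_section, current)
def pvStepA (skip : PySem.Set String) (s : List String × Bool × List String) (line : String) :
    List String × Bool × List String :=
  let (uc, inUser, cur) := s
  if PySem.Str.startswith line "## " then
    let uc' := if inUser && !cur.isEmpty then uc ++ cur else uc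
    let heading := PySem.Str.lower (PySem.Str.strip (PySem.Str.slice line (some 3) none))
    if !(PySem.Set.contains skip heading) then
      (uc', true, ["---", "", line, ""])
    else
      (uc', false, [])
  else if inUser then
    (uc, inUser, cur ++ [line])
  else
    s

def extract_user_sections_py (existing_lines : List String) (exclude : Option (List String)) : List String :=
  let skip := PySem.Set.union pvGenSections (exclude.getD [])
  let st := existing_lines.foldl (pvStepA skip) ([], false, [])
  if st.2.1 && !st.2.2.isEmpty then st.1 ++ st.2.2 else st.1

-- ===== PORT B =====
-- sections[-1][1].append(line)
def pvPushBody : List (String × List String) → String → List (String × List String)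
  | [], _ => []
  | [(h, b)], l => [(h, b ++ [l])]
  | x :: rest, l => x :: pvPushBody rest l

-- phase 1 loop body: start a new section at '## ', else extend the last one
def pvStepB (secs : List (String × List String)) (line : String) : List (String × List String) :=
  if PySem.Str.startswith line "## " then secs ++ [(line, [])]
  else if !secs.isEmpty then pvPushBody secs line
  else secs

-- phase 2 loop body: emit a kept section
def pvEmitStep (skip : PySem.Set String) (out : List String) (p : String × List String) : List String :=
  if !(PySem.Set.contains skip (PySem.Str.lower (PySem.Str.strip (PySem.Str.slice p.1 (some 3) none)))) then
    out ++ ["---", "", p.1, ""] ++ p.2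
  else out

def extract_user_sections_py_alt (existing_lines : List String) (exclude : Option (List String)) : List String :=
  let skip := PySem.Set.union pvGenSections (exclude.getD [])
  let sections := existing_lines.foldl pvStepB []
  sections.foldl (pvEmitStep skip) []

-- ===== PRECONDITION & SPEC =====
def Spec_extract_user_sections_py (existing_lines : List String) (exclude : Option (List String)) (out : List String) : Prop := out = extract_user_sections_py_alt existing_lines exclude
instance (existing_lines : List String) (exclude : Option (List String)) (out : List String) : Decidable (Spec_extract_user_sections_py existing_lines exclude out) := by unfold Spec_extract_user_sections_py; infer_instance

-- ===== CLAIM (what is proved, stated in full; the proofs are below) =====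
def Claim_equal_extract_user_sections_py : Prop := ∀ (existing_lines : List String) (exclude : Option (List String)), Dom_extract_user_sections_py existing_lines exclude → Spec_extract_user_sections_py existing_lines exclude (extract_user_sections_py existing_lines exclude)

-- ===== LEMMAS AND PROOFS =====

-- does a section with heading line h survive the skip filter?
def pvKeep (skip : PySem.Set String) (h : String) : Bool :=
  !(PySem.Set.contains skip (PySem.Str.lower (PySem.Str.strip (PySem.Str.slice h (some 3) none))))

-- what B's phase 2 emits for one section
def pvRender (skip : PySem.Set String) (p : String × List String) : List String :=
  if pvKeep skip p.1 then ["---", "", p.1, ""] ++ p.2 else []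

-- A's loop state while inside the section (h, b): flag and buffer are a function of (h, b)
def pvStA (skip : PySem.Set String) (uc : List String) (h : String) (b : List String) :
    List String × Bool × List String :=
  (uc, pvKeep skip h, if pvKeep skip h then ["---", "", h, ""] ++ b else [])

def pvFinA (s : List String × Bool × List String) : List String :=
  if s.2.1 && !s.2.2.isEmpty then s.1 ++ s.2.2 else s.1

lemma pvEmit_eq_flatMap (skip : PySem.Set String) (secs : List (String × List String)) (acc : List String) :
    secs.foldl (pvEmitStep skip) acc = acc ++ secs.flatMap (pvRender skip) := by
  induction secs generalizing acc with
  | nil => simp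
  | cons p rest ih =>
    simp only [List.foldl_cons, List.flatMap_cons, ih, pvEmitStep, pvRender, pvKeep]
    split_ifs <;> simp_all

lemma pvPushBody_cons (x : String × List String) (rest : List (String × List String)) (l : String)
    (hr : rest ≠ []) : pvPushBody (x :: rest) l = x :: pvPushBody rest l := by
  cases rest with
  | nil => exact absurd rfl hr
  | cons y ys => rfl

lemma pvPushBody_ne_nil (s : List (String × List String)) (l : String) (hs : s ≠ []) :
    pvPushBody s l ≠ [] := by
  cases s with
  | nil => exact absurd rfl hs
  | cons y ys =>
    cases ys with
    | nil => obtain ⟨y1, y2⟩ := y; simp [pvPushBody]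
    | cons z zs => rw [pvPushBody_cons y (z :: zs) l (by simp)]; simp

lemma pvPushBody_append (front s : List (String × List String)) (l : String) (hs : s ≠ []) :
    pvPushBody (front ++ s) l = front ++ pvPushBody s l := by
  induction front with
  | nil => rfl
  | cons x front' ih =>
    rw [List.cons_append, pvPushBody_cons x (front' ++ s) l (by simp [hs]), ih, List.cons_append]

lemma pvFoldB_factor (lines : List String) (front s : List (String × List String)) (hs : s ≠ []) :
    List.foldl pvStepB (front ++ s) lines = front ++ List.foldl pvStepB s lines := by
  induction lines generalizing s with
  | nil => rfl
  | cons l rest ih =>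
    simp only [List.foldl_cons, pvStepB]
    by_cases h1 : PySem.Str.startswith l "## " = true
    · rw [if_pos h1, if_pos h1, List.append_assoc, ih (s ++ [(l, [])]) (by simp)]
    · rw [if_neg h1, if_neg h1]
      have hfs : (!(front ++ s).isEmpty) = true := by simp [hs]
      have hss : (!s.isEmpty) = true := by simp [hs]
      rw [if_pos hfs, if_pos hss, pvPushBody_append front s l hs,
          ih (pvPushBody s l) (pvPushBody_ne_nil s l hs)]

-- core invariant: inside section (h, b), A's remaining run equals uc ++ B's emission of the remaining grouping
lemma pvCore (skip : PySem.Set String) (lines : List String) :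
    ∀ (uc : List String) (h : String) (b : List String),
    pvFinA (List.foldl (pvStepA skip) (pvStA skip uc h b) lines)
      = uc ++ (List.foldl pvStepB [(h, b)] lines).flatMap (pvRender skip) := by
  induction lines with
  | nil =>
    intro uc h b
    simp only [List.foldl_nil, pvStA, pvFinA, pvRender, List.flatMap_cons, List.flatMap_nil]
    by_cases hk : pvKeep skip h = true <;> simp_all
  | cons l rest ih =>
    intro uc h b
    simp only [List.foldl_cons]
    by_cases h1 : PySem.Str.startswith l "## " = true
    · have h1c : PySem.Chars.startswith l.toList ['#', '#', ' '] = true := by simpa using h1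
      have hA : pvStepA skip (pvStA skip uc h b) l
          = pvStA skip (uc ++ pvRender skip (h, b)) l [] := by
        simp only [pvStepA, pvStA, pvRender, pvKeep, if_pos h1]
        by_cases hk : PySem.Str.lower (PySem.Str.strip (PySem.Str.slice h (some 3) none)) ∈ skip <;>
          by_cases hl : PySem.Str.lower (PySem.Str.strip (PySem.Str.slice l (some 3) none)) ∈ skip <;>
            simp [hk, hl]
      have hB : pvStepB [(h, b)] l = [(h, b)] ++ [(l, [])] := by
        simp only [pvStepB, if_pos h1]
      rw [hA, hB, pvFoldB_factor rest [(h, b)] [(l, [])] (by simp), ih]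
      simp
    · have h1c : PySem.Chars.startswith l.toList ['#', '#', ' '] = false := by
        simpa using h1
      have hA : pvStepA skip (pvStA skip uc h b) l = pvStA skip uc h (b ++ [l]) := by
        simp only [pvStepA, pvStA, if_neg h1]
        by_cases hk : pvKeep skip h = true
        · simp [hk]
        · simp only [Bool.not_eq_true] at hk
          simp [hk]
      have hB : pvStepB [(h, b)] l = [(h, b ++ [l])] := by
        simp [pvStepB, h1c, pvPushBody]
      rw [hA, hB, ih]

-- before the first heading: A's state is ([], false, []) and B has no section yet
lemma pvPre (skip : PySem.Set String) (lines : List String) :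
    ∀ (uc : List String),
    pvFinA (List.foldl (pvStepA skip) (uc, false, []) lines)
      = uc ++ (List.foldl pvStepB [] lines).flatMap (pvRender skip) := by
  induction lines with
  | nil => intro uc; simp [pvFinA]
  | cons l rest ih =>
    intro uc
    simp only [List.foldl_cons]
    by_cases h1 : PySem.Str.startswith l "## " = true
    · have h1c : PySem.Chars.startswith l.toList ['#', '#', ' '] = true := by simpa using h1
      have hA : pvStepA skip (uc, false, []) l = pvStA skip uc l [] := by
        simp only [pvStepA, pvStA, pvKeep, if_pos h1]
        by_cases hk : PySem.Str.lower (PySem.Str.strip (PySem.Str.slice l (some 3) none)) ∈ skip <;>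
          simp [hk]
      have hB : pvStepB [] l = [(l, [])] := by
        simp [pvStepB, h1c]
      rw [hA, hB, pvCore skip rest uc l []]
    · have h1c : PySem.Chars.startswith l.toList ['#', '#', ' '] = false := by
        simpa using h1
      have hA : pvStepA skip (uc, false, []) l = (uc, false, []) := by
        simp [pvStepA, h1c]
      have hB : pvStepB [] l = [] := by
        simp [pvStepB, h1c]
      rw [hA, hB, ih]

-- ===== VERDICT (by name: the statement is the Claim_ definition above) =====
theorem extract_user_sections_py_spec : Claim_equal_extract_user_sections_py := by
  intro existing_lines exclude _
  unfold Spec_extract_user_sections_py extract_user_sections_py extract_user_sections_py_alt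
  rw [pvEmit_eq_flatMap]
  exact pvPre _ existing_lines []
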